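-- pv_equiv track=rewrite | github.com/andrea-mitridate/PTArcade | src/ptarcade/signal_builder.py | tnequad_conv
-- ===== SOURCE A (Python) =====
-- def tnequad_conv(noisedict: dict) -> bool:
--     """Check equad defintion.
--
--     Checks if the TempoNest definition of equad is used in the white noise dictionary.
--
--     Parameters
--     ----------
--     noisedict : dict
--         Dictionary containing noise terms.
--
--     Returns
--     -------
--     tnequad : bool
--         Whether TempoNest equad is used.
--
--     Raises
--     ------
--     SystemExit
--         If the equad convention is not consistent.
--
--     """
--     t2equad = False
--     tnequad = False
--
--     for x in noisedict:
--         if "tnequad" in x: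
--             tnequad = True
--         elif "t2equad" in x:
--             t2equad = True
--
--     if t2equad and tnequad:
--         err = "ERROR: The convention for equad is not consistent across the PTA data."
--         raise SystemExit(err)
--
--     return tnequad
-- ===== SOURCE B (Python) =====
-- def tnequad_conv(noisedict: dict) -> bool:
--     keys = list(noisedict)
--     seen_t2 = False
--     for i, x in enumerate(keys):
--         if "tnequad" in x:
--             # TempoNest convention found: a plain t2equad key before or after is a conflict.
--             if seen_t2 or any("t2equad" in y and "tnequad" not in y for y in keys[i + 1:]):
--                 raise SystemExit("ERROR: The convention for equad is not consistent across the PTA data.")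
--             return True
--         seen_t2 = seen_t2 or "t2equad" in x
--     return False
-- ===== Notes on version B (the rewrite author's own statement) =====
-- stated objective: alternative
-- what changed: Replaces A's exhaustive fold carrying two flags by an early-exit scan that returns True at the FIRST TempoNest key (after a conflict check of the one seen-t2 flag and the remaining keys), never touching the rest of the dictionary.
import Mathlib
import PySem

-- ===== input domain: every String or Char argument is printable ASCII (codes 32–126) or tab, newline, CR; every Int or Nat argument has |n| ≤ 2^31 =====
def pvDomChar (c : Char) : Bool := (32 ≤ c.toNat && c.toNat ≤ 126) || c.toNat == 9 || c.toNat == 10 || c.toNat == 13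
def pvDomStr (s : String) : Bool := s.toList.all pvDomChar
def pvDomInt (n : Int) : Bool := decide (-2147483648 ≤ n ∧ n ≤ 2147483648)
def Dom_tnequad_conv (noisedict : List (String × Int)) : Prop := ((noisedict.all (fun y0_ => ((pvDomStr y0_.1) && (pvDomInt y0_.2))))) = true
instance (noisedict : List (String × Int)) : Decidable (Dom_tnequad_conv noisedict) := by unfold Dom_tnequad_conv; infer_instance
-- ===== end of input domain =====

-- B replaces A's exhaustive two-flag fold by an early-exit scan returning at the first TempoNest key (alternative; equal cost).


-- ===== PORT A =====
-- A's single loop over the keys, carrying the two flags (t2equad, tnequad) as state.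
def tnequad_conv (noisedict : List (String × Int)) : Bool :=
  let st := noisedict.foldl
    (fun (st : Bool × Bool) x =>
      if PySem.Str.isIn "tnequad" x.1 then (st.1, true)
      else if PySem.Str.isIn "t2equad" x.1 then (true, st.2)
      else st)
    (false, false)
  -- if st.1 && st.2 then Python raises SystemExit (excluded by Pre_)
  st.2

-- ===== PORT B =====
-- B's for-loop with early return, transcribed as structural recursion over the
-- remaining keys carrying the seen_t2 flag (the loop variable).
def tnequadScan : List String → Bool → Bool
  | [], _ => false
  | x :: rest, seenT2 =>
    if PySem.Str.isIn "tnequad" x then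
      if seenT2 || rest.any (fun y => PySem.Str.isIn "t2equad" y && !PySem.Str.isIn "tnequad" y) then
        true  -- Python raises SystemExit here (excluded by Pre_)
      else true  -- early return True
    else tnequadScan rest (seenT2 || PySem.Str.isIn "t2equad" x)

def tnequad_conv_alt (noisedict : List (String × Int)) : Bool :=
  tnequadScan (noisedict.map (fun p => p.1)) false

-- ===== PRECONDITION & SPEC =====
-- Pre_ excludes exactly the inputs where both Pythons raise SystemExit
-- (some key contains "tnequad" and some key contains "t2equad" without "tnequad").
def Pre_tnequad_conv (noisedict : List (String × Int)) : Prop :=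
  ¬ ((noisedict.any (fun x => PySem.Str.isIn "tnequad" x.1)) = true ∧
     (noisedict.any (fun x => PySem.Str.isIn "t2equad" x.1 && !PySem.Str.isIn "tnequad" x.1)) = true)
instance (noisedict : List (String × Int)) : Decidable (Pre_tnequad_conv noisedict) := by
  unfold Pre_tnequad_conv; infer_instance

def pvWitness_tnequad_conv : (List (String × Int)) := [("tnequad_efac", 1), ("ecorr", 2)]

def Spec_tnequad_conv (noisedict : List (String × Int)) (out : Bool) : Prop := out = tnequad_conv_alt noisedict
instance (noisedict : List (String × Int)) (out : Bool) : Decidable (Spec_tnequad_conv noisedict out) := by unfold Spec_tnequad_conv; infer_instance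

-- ===== CLAIM (what is proved, stated in full; the proofs are below) =====
def Claim_equal_tnequad_conv : Prop := ∀ (noisedict : List (String × Int)), Dom_tnequad_conv noisedict → Pre_tnequad_conv noisedict → Spec_tnequad_conv noisedict (tnequad_conv noisedict)

-- ===== LEMMAS AND PROOFS =====
-- The tnequad flag of A's loop is an any() over the keys.
theorem tnequad_foldl_snd {α : Type} (p q : α → Bool) (l : List α) (st : Bool × Bool) :
    (l.foldl
      (fun (st : Bool × Bool) x =>
        if p x then (st.1, true)
        else if q x then (true, st.2)
        else st)
      st).2 = (st.2 || l.any p) := by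
  induction l generalizing st with
  | nil => simp
  | cons h t ih =>
    simp only [List.foldl_cons, List.any_cons]
    by_cases h1 : p h
    · simp [h1, ih]
    · by_cases h2 : q h <;> simp [h1, h2, ih]

-- B's early-exit scan also returns the any() of the keys, whatever the seen_t2 flag.
theorem tnequadScan_eq_any (l : List String) (s : Bool) :
    tnequadScan l s = l.any (fun x => PySem.Str.isIn "tnequad" x) := by
  induction l generalizing s with
  | nil => simp [tnequadScan]
  | cons h t ih =>
    by_cases h1 : PySem.Str.isIn "tnequad" h <;>
      simp [tnequadScan, ih]

-- ===== VERDICT (by name: the statement is the Claim_ definition above) =====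
theorem tnequad_conv_spec : Claim_equal_tnequad_conv := by
  intro noisedict _ _
  unfold Spec_tnequad_conv tnequad_conv tnequad_conv_alt
  simp only [tnequad_foldl_snd, tnequadScan_eq_any, Bool.false_or, List.any_map]
  rfl
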